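-- pv_equiv track=rewrite | github.com/longtruongv/ToiUuLapKeHoach | src/run_file/greedy.py | get_priority_from_features
-- ===== SOURCE A (Python) =====
-- def get_priority_from_features(features_dict, is_get_min=True):
--     # features_dict = dict{candidate: feature}
--     features_set = list(set([features_dict[cand] for cand in features_dict]))
--     features_set.sort(reverse=is_get_min)
--
--     output = {} # {candidate: priority}
--     for cand in features_dict:
--         feat = features_dict[cand]
--         output[cand] = features_set.index(feat)
--
--     return output
-- ===== SOURCE B (Python) =====
-- def get_priority_from_features(features_dict, is_get_min=True):
--     # rank = number of distinct feature values strictly ahead of this one; no sorting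
--     vals = set(features_dict.values())
--     return {cand: sum(1 for v in vals if (feat < v if is_get_min else v < feat))
--             for cand, feat in features_dict.items()}
-- ===== Notes on version B (the rewrite author's own statement) =====
-- stated objective: alternative
-- what changed: Replaces 'sort the distinct values then look up each rank with list.index' by direct comparison-counting: each candidate's priority is the number of distinct values strictly above (is_get_min) or below it, with no sort and no index scan.
import Mathlib
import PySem

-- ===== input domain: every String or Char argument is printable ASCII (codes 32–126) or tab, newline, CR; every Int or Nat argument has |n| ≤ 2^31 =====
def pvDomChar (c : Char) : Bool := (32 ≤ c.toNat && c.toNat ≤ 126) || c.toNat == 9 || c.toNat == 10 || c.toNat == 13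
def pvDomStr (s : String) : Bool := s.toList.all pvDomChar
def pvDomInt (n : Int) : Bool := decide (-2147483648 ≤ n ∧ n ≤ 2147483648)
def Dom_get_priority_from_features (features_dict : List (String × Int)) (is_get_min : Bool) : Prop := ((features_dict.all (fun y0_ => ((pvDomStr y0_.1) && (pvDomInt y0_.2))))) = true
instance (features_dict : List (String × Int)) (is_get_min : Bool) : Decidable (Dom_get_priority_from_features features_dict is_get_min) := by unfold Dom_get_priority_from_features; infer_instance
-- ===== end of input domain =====

-- B replaces A's sort-then-list.index ranking by counting, for each candidate, the
-- distinct values strictly ahead of its value (alternative algorithm, no sort).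

-- ===== PORT A =====
-- features_set = sorted(set(values), reverse=is_get_min); output[cand] = features_set.index(feat)
def get_priority_from_features (features_dict : List (String × Int)) (is_get_min : Bool) : List (String × Int) :=
  let d := PySem.Dict.ofList features_dict
  let features_set := PySem.List.sorted (PySem.Set.ofList d.values) (fun x => x) is_get_min
  (d.keys.foldl (fun (out : PySem.Dict String Int) cand =>
      out.insert cand (Int.ofNat ((PySem.List.index? features_set (d.getD cand 0)).getD 0)))
    PySem.Dict.empty).items

-- ===== PORT B =====
-- vals = set(values); priority = #{v in vals | v strictly ahead of feat}
def get_priority_from_features_alt (features_dict : List (String × Int)) (is_get_min : Bool) : List (String × Int) :=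
  let d := PySem.Dict.ofList features_dict
  let vals : PySem.Set Int := PySem.Set.ofList d.values
  d.items.map (fun p =>
    (p.1, Int.ofNat (vals.countP (fun v => if is_get_min then p.2 < v else v < p.2))))

-- ===== PRECONDITION & SPEC =====
def Spec_get_priority_from_features (features_dict : List (String × Int)) (is_get_min : Bool) (out : List (String × Int)) : Prop := out = get_priority_from_features_alt features_dict is_get_min
instance (features_dict : List (String × Int)) (is_get_min : Bool) (out : List (String × Int)) : Decidable (Spec_get_priority_from_features features_dict is_get_min out) := by unfold Spec_get_priority_from_features; infer_instance

-- ===== CLAIM (what is proved, stated in full; the proofs are below) =====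
def Claim_equal_get_priority_from_features : Prop := ∀ (features_dict : List (String × Int)) (is_get_min : Bool), Dom_get_priority_from_features features_dict is_get_min → Spec_get_priority_from_features features_dict is_get_min (get_priority_from_features features_dict is_get_min)

-- ===== LEMMAS AND PROOFS =====

-- In a strictly increasing list, the index of an element is the number of smaller elements.
theorem pv_index_count_asc (s : List Int) (hp : s.Pairwise (· < ·)) (feat : Int) (hm : feat ∈ s) :
    PySem.List.index? s feat = some (s.countP (fun v => decide (v < feat))) := by
  induction s with
  | nil => cases hm
  | cons x t ih =>
    rw [List.pairwise_cons] at hp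
    by_cases hx : x = feat
    · subst hx
      rw [PySem.List.index?_cons_self]
      have h0 : t.countP (fun v => decide (v < x)) = 0 := by
        apply List.countP_eq_zero.mpr
        intro v hv
        simp only [decide_eq_true_eq, not_lt]
        exact le_of_lt (hp.1 v hv)
      simp [h0]
    · have hmt : feat ∈ t := by cases hm with
        | head => exact absurd rfl hx
        | tail _ h => exact h
      rw [PySem.List.index?_cons_of_ne t hx, ih hp.2 hmt]
      have hxf : x < feat := hp.1 feat hmt
      simp [hxf]

-- In a strictly decreasing list, the index of an element is the number of larger elements.
theorem pv_index_count_desc (s : List Int) (hp : s.Pairwise (· > ·)) (feat : Int) (hm : feat ∈ s) :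
    PySem.List.index? s feat = some (s.countP (fun v => decide (feat < v))) := by
  induction s with
  | nil => cases hm
  | cons x t ih =>
    rw [List.pairwise_cons] at hp
    by_cases hx : x = feat
    · subst hx
      rw [PySem.List.index?_cons_self]
      have h0 : t.countP (fun v => decide (x < v)) = 0 := by
        apply List.countP_eq_zero.mpr
        intro v hv
        simp only [decide_eq_true_eq, not_lt]
        exact le_of_lt (hp.1 v hv)
      simp [h0]
    · have hmt : feat ∈ t := by cases hm with
        | head => exact absurd rfl hx
        | tail _ h => exact h
      rw [PySem.List.index?_cons_of_ne t hx, ih hp.2 hmt]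
      have hxf : feat < x := hp.1 feat hmt
      simp [hxf]

-- The sorted distinct values: strictly ordered in both directions.
theorem pv_sorted_strict (xs : List Int) (m : Bool) :
    (PySem.List.sorted (PySem.Set.ofList xs) (fun x => x) m).Pairwise
      (fun a b => if m then a > b else a < b) := by
  cases m with
  | false =>
    simpa using PySem.List.sorted_ofList_pairwise_lt (xs := xs)
  | true =>
    have hle : (PySem.List.sorted (PySem.Set.ofList xs) (fun x => x) true).Pairwise
        (fun a b => b ≤ a) := PySem.List.sorted_pairwise_rev _ _
    have hnd : (PySem.List.sorted (PySem.Set.ofList xs) (fun x => x) true).Nodup :=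
      (PySem.List.sorted_perm _ _ _).nodup_iff.mpr (PySem.Set.nodup_ofList xs)
    have hne : (PySem.List.sorted (PySem.Set.ofList xs) (fun x => x) true).Pairwise (· ≠ ·) := hnd
    have := hle.and hne
    refine this.imp ?_
    intro a b ⟨h1, h2⟩
    simpa using lt_of_le_of_ne h1 (Ne.symm h2)

-- Core: index in the sorted distinct list = count of strictly-ahead distinct values.
theorem pv_rank_eq (xs : List Int) (m : Bool) (feat : Int) (hm : feat ∈ xs) :
    (PySem.List.index? (PySem.List.sorted (PySem.Set.ofList xs) (fun x => x) m) feat).getD 0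
      = (PySem.Set.ofList xs).countP (fun v => if m then feat < v else v < feat) := by
  have hperm : (PySem.List.sorted (PySem.Set.ofList xs) (fun x => x) m).Perm (PySem.Set.ofList xs) :=
    PySem.List.sorted_perm _ _ _
  have hmem : feat ∈ PySem.List.sorted (PySem.Set.ofList xs) (fun x => x) m :=
    hperm.mem_iff.mpr ((PySem.Set.mem_ofList _ _).mpr hm)
  have hcnt := hperm.countP_eq (fun v => if m then decide (feat < v) else decide (v < feat))
  cases m with
  | false =>
    have hp := pv_sorted_strict xs false
    simp only [] at hp ⊢
    rw [pv_index_count_asc _ hp feat hmem]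
    simpa using hcnt
  | true =>
    have hp := pv_sorted_strict xs true
    simp only [if_true] at hp ⊢
    rw [pv_index_count_desc _ hp feat hmem]
    simpa using hcnt

-- ===== VERDICT (by name: the statement is the Claim_ definition above) =====
theorem get_priority_from_features_spec : Claim_equal_get_priority_from_features := by
  intro fd m _
  unfold Spec_get_priority_from_features get_priority_from_features get_priority_from_features_alt
  set d := PySem.Dict.ofList fd with hd
  have hnd : d.keys.Nodup := PySem.Dict.nodup_keys_ofList fd
  have hfold := PySem.Dict.items_foldl_insert_fresh (l := d.keys) (k := fun c => c)
      (v := fun c => (Int.ofNat ((PySem.List.index?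
        (PySem.List.sorted (PySem.Set.ofList d.values) (fun x => x) m) (d.getD c 0)).getD 0)))
      (d := PySem.Dict.empty)
      (by intro a _; simp [PySem.Dict.contains_empty]) (by simpa using hnd)
  simp only at hfold ⊢
  rw [hfold]
  rw [PySem.Dict.items_eq_map_keys d hnd 0]
  rw [show (PySem.Dict.empty : PySem.Dict String Int).items = [] from rfl]
  simp only [List.nil_append, List.map_map]
  apply List.map_congr_left
  intro c hc
  have hfeat : d.getD c 0 ∈ d.values := by
    rw [PySem.Dict.values_eq_map_keys d hnd 0]
    exact List.mem_map.mpr ⟨c, hc, rfl⟩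
  have := pv_rank_eq d.values m (d.getD c 0) hfeat
  simp only [Function.comp]
  rw [this]
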